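-- pv_equiv track=rewrite | github.com/MwlLj/sqlite2cpp | write_base.py | __replace_substring_by_pos
-- ===== SOURCE A (Python) =====
-- def __replace_substring_by_pos(src, begin, end, s):
-- 	li = []
-- 	i = 0
-- 	for item in src:
-- 		if i >= begin and i < end:
-- 			li.append(s)
-- 		else:
-- 			li.append(item)
-- 		i += 1
-- 	return "".join(li)
-- ===== SOURCE B (Python) =====
-- def __replace_substring_by_pos(src, begin, end, s):
--     n = len(src)
--     lo = max(0, min(begin, n))
--     hi = max(lo, min(end, n))
--     return src[:lo] + s * (hi - lo) + src[hi:]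
-- ===== Notes on version B (the rewrite author's own statement) =====
-- stated objective: simpler
-- what changed: Replaces the per-character indexed loop (append s or the char for every position, then join) with a single closed-form expression src[:lo] + s*(hi-lo) + src[hi:] where lo and hi are begin/end clamped into [0, len(src)].
import Mathlib
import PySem

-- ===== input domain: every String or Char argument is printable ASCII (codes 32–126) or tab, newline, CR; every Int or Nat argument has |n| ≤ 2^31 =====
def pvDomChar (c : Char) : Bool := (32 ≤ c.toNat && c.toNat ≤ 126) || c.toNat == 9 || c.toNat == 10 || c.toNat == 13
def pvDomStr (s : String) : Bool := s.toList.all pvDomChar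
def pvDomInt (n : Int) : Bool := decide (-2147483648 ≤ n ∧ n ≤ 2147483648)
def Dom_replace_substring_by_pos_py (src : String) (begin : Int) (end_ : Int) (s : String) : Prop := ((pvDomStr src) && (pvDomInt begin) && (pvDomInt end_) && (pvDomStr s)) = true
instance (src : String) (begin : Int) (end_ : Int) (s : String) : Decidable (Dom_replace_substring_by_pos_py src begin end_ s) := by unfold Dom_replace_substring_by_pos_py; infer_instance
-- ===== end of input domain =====

-- B replaces A's per-character indexed loop by a closed-form clamped slice-and-repeat
-- expression (objective: simpler).

-- ===== PORT A =====
-- the for-loop over src with running index i, appending either s or the character to li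
def pvALoop (begin end_ : Int) (s : String) : List Char → Int → List String
  | [], _ => []
  | item :: rest, i =>
      (if i ≥ begin ∧ i < end_ then s else String.ofList [item]) :: pvALoop begin end_ s rest (i + 1)

def replace_substring_by_pos_py (src : String) (begin : Int) (end_ : Int) (s : String) : String :=
  PySem.Str.join "" (pvALoop begin end_ s src.toList 0)

-- ===== PORT B =====
-- src[:lo] + s * (hi - lo) + src[hi:] with lo, hi clamped into [0, len(src)]
def replace_substring_by_pos_py_alt (src : String) (begin : Int) (end_ : Int) (s : String) : String :=
  let cs := src.toList
  let n : Int := cs.length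
  let lo : Int := max 0 (min begin n)
  let hi : Int := max lo (min end_ n)
  String.ofList (PySem.List.slice cs none (some lo)
    ++ PySem.List.pyRepeat s.toList (hi - lo)
    ++ PySem.List.slice cs (some hi) none)

-- ===== PRECONDITION & SPEC =====
def Spec_replace_substring_by_pos_py (src : String) (begin : Int) (end_ : Int) (s : String) (out : String) : Prop := out = replace_substring_by_pos_py_alt src begin end_ s
instance (src : String) (begin : Int) (end_ : Int) (s : String) (out : String) : Decidable (Spec_replace_substring_by_pos_py src begin end_ s out) := by unfold Spec_replace_substring_by_pos_py; infer_instance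

-- ===== CLAIM (what is proved, stated in full; the proofs are below) =====
def Claim_equal_replace_substring_by_pos_py : Prop := ∀ (src : String) (begin : Int) (end_ : Int) (s : String), Dom_replace_substring_by_pos_py src begin end_ s → Spec_replace_substring_by_pos_py src begin end_ s (replace_substring_by_pos_py src begin end_ s)

-- ===== LEMMAS AND PROOFS =====

-- shifting the loop's running index by one is the same as shifting both bounds down
theorem pvALoop_shift (s : String) (l : List Char) :
    ∀ (b e i : Int), pvALoop b e s l i = pvALoop (b - i) (e - i) s l 0 := by
  induction l with
  | nil => intro b e i; rfl
  | cons c rest ih =>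
    intro b e i
    simp only [pvALoop, List.cons.injEq]
    refine ⟨?_, ?_⟩
    · congr 1
      simp only [eq_iff_iff]
      omega
    · rw [ih b e (i + 1), ih (b - i) (e - i) (0 + 1)]
      congr 1 <;> omega

-- the flattened loop output is B's take ++ repeat ++ drop, at the char-list level
theorem pvCore (s : String) :
    ∀ (l : List Char) (b e : Int),
      ((pvALoop b e s l 0).map String.toList).flatten
        = l.take (max 0 (min b (l.length : Int))).toNat
          ++ (List.replicate ((max (max 0 (min b (l.length : Int))) (min e (l.length : Int))).toNat
                - (max 0 (min b (l.length : Int))).toNat) s.toList).flatten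
          ++ l.drop (max (max 0 (min b (l.length : Int))) (min e (l.length : Int))).toNat := by
  intro l
  induction l with
  | nil =>
    intro b e
    simp [pvALoop]
  | cons c rest ih =>
    intro b e
    have hlen : ((c :: rest).length : Int) = (rest.length : Int) + 1 := by
      simp
    simp only [pvALoop, List.map_cons, List.flatten_cons]
    rw [pvALoop_shift s rest b e (0 + 1)]
    have h01 : b - (0 + 1) = b - 1 := by omega
    have h02 : e - (0 + 1) = e - 1 := by omega
    rw [h01, h02, ih (b - 1) (e - 1)]
    by_cases hb : b ≤ 0
    · by_cases he : 0 < e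
      · -- index 0 replaced
        have h1 : (max 0 (min b ((c :: rest).length : Int))).toNat = 0 := by
          simp only [hlen]; omega
        have h2 : (max 0 (min (b - 1) ((rest).length : Int))).toNat = 0 := by omega
        have h3 : (max (max 0 (min b ((c :: rest).length : Int))) (min e ((c :: rest).length : Int))).toNat
            = (max (max 0 (min (b - 1) ((rest).length : Int))) (min (e - 1) ((rest).length : Int))).toNat + 1 := by
          simp only [hlen]; omega
        have hif : (0 ≥ b ∧ (0:Int) < e) := ⟨by omega, he⟩
        rw [h1, h2, h3]
        simp [hif, List.replicate_succ, List.drop_succ_cons]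
      · -- e ≤ 0 : nothing is ever replaced; both sides are take ++ drop = the list
        have h2 : (max (max 0 (min (b-1) ((rest).length : Int))) (min (e-1) ((rest).length : Int))).toNat
            = (max 0 (min (b-1) ((rest).length : Int))).toNat := by omega
        have h1 : (max (max 0 (min b ((c :: rest).length : Int))) (min e ((c :: rest).length : Int))).toNat
            = (max 0 (min b ((c :: rest).length : Int))).toNat := by
          simp only [hlen]; omega
        have hif : ¬ (0 ≥ b ∧ (0:Int) < e) := by omega
        rw [h1, h2]
        simp only [Nat.sub_self, List.replicate_zero, List.flatten_nil, hif, if_false]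
        simp [String.toList_ofList]
    · -- b ≥ 1 : index 0 kept
      have h1 : (max 0 (min b ((c :: rest).length : Int))).toNat
          = (max 0 (min (b - 1) ((rest).length : Int))).toNat + 1 := by
        simp only [hlen]; omega
      have h3 : (max (max 0 (min b ((c :: rest).length : Int))) (min e ((c :: rest).length : Int))).toNat
          = (max (max 0 (min (b - 1) ((rest).length : Int))) (min (e - 1) ((rest).length : Int))).toNat + 1 := by
        simp only [hlen]; omega
      have hif : ¬ (0 ≥ b ∧ (0:Int) < e) := by omega
      rw [h1, h3]
      simp [hif, String.toList_ofList, List.take_succ_cons, List.drop_succ_cons,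
        Nat.succ_sub_succ]

-- Chars.join with empty separator is flatten
theorem pvJoin_nil (parts : List (List Char)) :
    PySem.Chars.join [] parts = parts.flatten := by
  simp [PySem.Chars.join, List.intercalate]
  induction parts with
  | nil => rfl
  | cons p ps ih =>
    cases ps with
    | nil => simp [List.intersperse]
    | cons q qs =>
      simp only [List.intersperse, List.flatten_cons] at *
      simpa using ih

-- ===== VERDICT (by name: the statement is the Claim_ definition above) =====
theorem replace_substring_by_pos_py_spec : Claim_equal_replace_substring_by_pos_py := by
  intro src b e s _
  unfold Spec_replace_substring_by_pos_py
  apply String.toList_inj.mp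
  unfold replace_substring_by_pos_py replace_substring_by_pos_py_alt
  rw [PySem.Str.toList_join]
  have htl : ("" : String).toList = [] := rfl
  rw [htl, pvJoin_nil, pvCore]
  have hlo : (0:Int) ≤ max 0 (min b (src.toList.length : Int)) := le_max_left _ _
  have hhi : (0:Int) ≤ max (max 0 (min b (src.toList.length : Int))) (min e (src.toList.length : Int)) :=
    le_trans hlo (le_max_left _ _)
  simp only [PySem.List.slice_to _ hlo, PySem.List.slice_from _ hhi, PySem.List.pyRepeat,
    String.toList_ofList]
  have hrep : (max (max 0 (min b (src.toList.length : Int))) (min e (src.toList.length : Int))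
      - max 0 (min b (src.toList.length : Int))).toNat
      = (max (max 0 (min b (src.toList.length : Int))) (min e (src.toList.length : Int))).toNat
        - (max 0 (min b (src.toList.length : Int))).toNat := by omega
  rw [hrep]
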